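-- pv_equiv track=rewrite | github.com/Sco314/dog-rescue-tracker | scrapers/poodle_patch.py | _extract_health_notes
-- ===== SOURCE A (Python) =====
-- def _extract_health_notes(text: str) -> str:
--   """Extract health-related notes"""
--   health_keywords = [
--     "vetted", "neutered", "spayed", "vaccinated", "microchipped",
--     "heartworm", "health", "medical"
--   ]
--   notes = []
--   for keyword in health_keywords:
--     if keyword in text.lower():
--       # Find the sentence containing this keyword
--       sentences = text.split(".")
--       for s in sentences:
--         if keyword in s.lower():
--           notes.append(s.strip())
--           break
--   return ". ".join(notes[:3])  # First 3 relevant notes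
-- ===== SOURCE B (Python) =====
-- def _extract_health_notes(text: str) -> str:
--   """Extract health-related notes: split once, one pass over sentences building a keyword-indexed table."""
--   health_keywords = [
--     "vetted", "neutered", "spayed", "vaccinated", "microchipped",
--     "heartworm", "health", "medical"
--   ]
--   index = {}
--   for s in text.split("."):
--     ls = s.lower()
--     for k in health_keywords:
--       if k not in index and k in ls:
--         index[k] = s.strip()
--   notes = [index[k] for k in health_keywords if k in index]
--   return ". ".join(notes[:3])
-- ===== Notes on version B (the rewrite author's own statement) =====
-- stated objective: faster
-- what changed: A re-scans the whole text and re-splits it into sentences once per matching keyword; B splits once and makes a single pass over the sentences, filling a keyword-to-first-matching-sentence dict, then emits the notes in keyword order.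
import Mathlib
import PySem

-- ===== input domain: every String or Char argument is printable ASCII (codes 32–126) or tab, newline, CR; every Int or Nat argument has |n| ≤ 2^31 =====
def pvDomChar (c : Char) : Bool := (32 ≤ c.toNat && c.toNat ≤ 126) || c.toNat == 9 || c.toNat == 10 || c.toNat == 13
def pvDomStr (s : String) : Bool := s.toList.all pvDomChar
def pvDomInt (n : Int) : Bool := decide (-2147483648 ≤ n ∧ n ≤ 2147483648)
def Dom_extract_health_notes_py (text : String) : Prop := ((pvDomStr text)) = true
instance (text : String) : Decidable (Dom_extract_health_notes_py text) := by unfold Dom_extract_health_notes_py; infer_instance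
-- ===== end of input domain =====

-- B replaces A's per-keyword re-split and re-scan of the text by one split and a single pass over
-- the sentences filling a keyword-indexed dict; notes are then emitted in keyword order.


-- the literal keyword list both Pythons contain
def pvHealthKeywords : List String :=
  ["vetted", "neutered", "spayed", "vaccinated", "microchipped", "heartworm", "health", "medical"]

-- ===== PORT A =====
-- A's inner `for s in sentences: if keyword in s.lower(): notes.append(s.strip()); break`
def pvScanA (keyword : String) (notes : List String) : List String → List String
  | [] => notes
  | s :: rest =>
    if PySem.Str.isIn keyword (PySem.Str.lower s) then notes ++ [PySem.Str.strip s]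
    else pvScanA keyword notes rest

def extract_health_notes_py (text : String) : String :=
  let notes := pvHealthKeywords.foldl (fun notes keyword =>
    if PySem.Str.isIn keyword (PySem.Str.lower text) then
      pvScanA keyword notes ((PySem.Str.split? text ".").getD [])
    else notes) []
  PySem.Str.join ". " (PySem.List.slice notes none (some 3))

-- ===== PORT B =====
def extract_health_notes_py_alt (text : String) : String :=
  let sentences := (PySem.Str.split? text ".").getD []
  let index := sentences.foldl (fun d s =>
    let ls := PySem.Str.lower s
    pvHealthKeywords.foldl (fun d k =>
      if !d.contains k && PySem.Str.isIn k ls then d.insert k (PySem.Str.strip s) else d) d)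
    PySem.Dict.empty
  let notes := pvHealthKeywords.filterMap (fun k => index.get? k)
  PySem.Str.join ". " (PySem.List.slice notes none (some 3))

-- ===== PRECONDITION & SPEC =====
def Spec_extract_health_notes_py (text : String) (out : String) : Prop := out = extract_health_notes_py_alt text
instance (text : String) (out : String) : Decidable (Spec_extract_health_notes_py text out) := by unfold Spec_extract_health_notes_py; infer_instance

-- ===== CLAIM (what is proved, stated in full; the proofs are below) =====
def Claim_equal_extract_health_notes_py : Prop := ∀ (text : String), Dom_extract_health_notes_py text → Spec_extract_health_notes_py text (extract_health_notes_py text)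

-- ===== LEMMAS AND PROOFS =====

-- A's outer foldl in filterMap form
theorem pvFoldlToList {α β : Type} (g : α → Option β) :
    ∀ (l : List α) (init : List β),
    l.foldl (fun acc x => acc ++ (g x).toList) init = init ++ l.filterMap g := by
  intro l
  induction l with
  | nil => simp
  | cons x t ih => intro init; simp [List.foldl_cons, ih, List.filterMap_cons]; cases g x <;> simp

-- folding B's inner keyword loop over keys other than k leaves k's entry alone
theorem pvFoldGetOther (v : String) (ls : String) (k : String) :
    ∀ (l : List String) (d : PySem.Dict String String), k ∉ l →
    (l.foldl (fun d k' =>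
      if !d.contains k' && PySem.Str.isIn k' ls then d.insert k' v else d) d).get? k = d.get? k := by
  intro l
  induction l with
  | nil => intro d _; rfl
  | cons x t ih =>
    intro d hk
    simp only [List.mem_cons, not_or] at hk
    simp only [List.foldl_cons]
    rw [ih _ hk.2]
    split
    · exact PySem.Dict.get?_insert_of_ne _ _ hk.1
    · rfl

-- B's inner loop: k's entry after one sentence
theorem pvInnerGet (s : String) (k : String) :
    ∀ (l : List String), l.Nodup → k ∈ l → ∀ (d : PySem.Dict String String),
    (l.foldl (fun d k' =>
      if !d.contains k' && PySem.Str.isIn k' (PySem.Str.lower s) then d.insert k' (PySem.Str.strip s) else d) d).get? k =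
      (d.get? k).or (if PySem.Str.isIn k (PySem.Str.lower s) then some (PySem.Str.strip s) else none) := by
  intro l
  induction l with
  | nil => intro _ hk; simp at hk
  | cons x t ih =>
    intro hnd hk d
    simp only [List.nodup_cons] at hnd
    rcases List.mem_cons.mp hk with rfl | hkt
    · simp only [List.foldl_cons]
      rw [pvFoldGetOther _ _ _ _ _ hnd.1]
      rw [PySem.Dict.contains_eq_isSome_get?]
      cases hg : d.get? k with
      | some v => simp [hg]
      | none =>
        simp only [Option.isSome_none, Bool.not_false, Bool.true_and, Option.none_or]
        split
        · simp [PySem.Dict.get?_insert_self]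
        · rename_i h; simp only [Bool.not_eq_true] at h; rw [hg]
    · have hxk : x ≠ k := fun he => hnd.1 (he ▸ hkt)
      simp only [List.foldl_cons]
      have h1 : ∀ (d' : PySem.Dict String String),
          (if (!d'.contains x && PySem.Str.isIn x (PySem.Str.lower s)) = true then d'.insert x (PySem.Str.strip s) else d').get? k = d'.get? k := by
        intro d'; split
        · exact PySem.Dict.get?_insert_of_ne _ _ (Ne.symm hxk)
        · rfl
      rw [ih hnd.2 hkt, h1]

-- B's outer loop: k's entry is the first matching sentence, stripped
theorem pvOuterGet (k : String) (hk : k ∈ pvHealthKeywords) :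
    ∀ (sents : List String) (d : PySem.Dict String String),
    (sents.foldl (fun d s =>
      pvHealthKeywords.foldl (fun d k' =>
        if !d.contains k' && PySem.Str.isIn k' (PySem.Str.lower s) then d.insert k' (PySem.Str.strip s) else d) d) d).get? k =
      (d.get? k).or (((sents.find? (fun s => PySem.Str.isIn k (PySem.Str.lower s))).map PySem.Str.strip)) := by
  have hnd : pvHealthKeywords.Nodup := by decide
  intro sents
  induction sents with
  | nil => intro d; simp
  | cons s rest ih =>
    intro d
    simp only [List.foldl_cons, List.find?_cons]
    rw [ih, pvInnerGet s k pvHealthKeywords hnd hk d]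
    cases hg : d.get? k with
    | some v => simp
    | none =>
      simp only [Option.none_or]
      split
      all_goals rename_i h; simp only [PySem.Str.isIn_eq, PySem.Str.toList_lower, Bool.not_eq_true] at h; simp [h]

-- A's scan-with-break appends the first match, stripped
theorem pvScanA_eq (k : String) : ∀ (notes : List String) (sents : List String),
    pvScanA k notes sents =
      notes ++ ((sents.find? (fun s => PySem.Str.isIn k (PySem.Str.lower s))).map PySem.Str.strip).toList := by
  intro notes sents
  induction sents with
  | nil => simp [pvScanA]
  | cons s rest ih =>
    simp only [pvScanA, List.find?_cons]
    split
    all_goals rename_i h; simp only [PySem.Str.isIn_eq, PySem.Str.toList_lower, Bool.not_eq_true] at h; simp [h, ih]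

-- a substring of an infix's lowercase is a substring of the whole's lowercase
theorem pvIsInLowerMono (k s t : String) (hinf : s.toList <:+: t.toList)
    (h : PySem.Str.isIn k (PySem.Str.lower s) = true) :
    PySem.Str.isIn k (PySem.Str.lower t) = true := by
  rw [PySem.Str.isIn_iff_infix] at h ⊢
  rw [PySem.Str.toList_lower] at h ⊢
  exact h.trans (by simpa [PySem.Chars.lower] using List.IsInfix.map PySem.Chars.lowerChar hinf)

-- every piece produced by splitOn.go is an infix of cur.reverse ++ l, or was already in acc
theorem pvGoInfix (sep : List Char) : ∀ (fuel : Nat) (l cur : List Char) (acc : List (List Char))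
    (piece : List Char), piece ∈ PySem.Chars.splitOn.go sep fuel l cur acc →
    piece <:+: cur.reverse ++ l ∨ piece ∈ acc := by
  intro fuel
  induction fuel with
  | zero =>
    intro l cur acc piece h
    simp only [PySem.Chars.splitOn.go] at h
    rw [List.mem_reverse, List.mem_cons] at h
    rcases h with rfl | h
    · exact Or.inl (List.infix_refl _)
    · exact Or.inr h
  | succ fuel ih =>
    intro l cur acc piece h
    match l with
    | [] =>
      simp only [PySem.Chars.splitOn.go] at h
      rw [List.mem_reverse, List.mem_cons] at h
      rcases h with rfl | h
      · exact Or.inl (List.prefix_append _ _).isInfix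
      · exact Or.inr h
    | c :: rest =>
      simp only [PySem.Chars.splitOn.go] at h
      by_cases hp : sep.isPrefixOf (c :: rest) = true
      · rw [if_pos hp] at h
        rcases ih _ _ _ _ h with h' | h'
        · left
          simp only [List.reverse_nil, List.nil_append] at h'
          exact h'.trans ((List.drop_suffix _ _).isInfix.trans (List.suffix_append _ _).isInfix)
        · rw [List.mem_cons] at h'
          rcases h' with rfl | h'
          · exact Or.inl (List.prefix_append _ _).isInfix
          · exact Or.inr h'
      · rw [if_neg hp] at h
        rcases ih _ _ _ _ h with h' | h'
        · left
          simpa using h'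
        · exact Or.inr h'

theorem pvMemSplitOnInfix (cs sep piece : List Char) (h : piece ∈ PySem.Chars.splitOn cs sep) :
    piece <:+: cs := by
  unfold PySem.Chars.splitOn at h
  rcases pvGoInfix sep _ _ _ _ _ h with h' | h'
  · simpa using h'
  · simp at h'

-- a sentence of text.split(".") is an infix of text
theorem pvSentenceInfix (text s : String)
    (hs : s ∈ (PySem.Str.split? text ".").getD []) : s.toList <:+: text.toList := by
  have hmap := PySem.Str.split?_map text "."
  cases hsp : PySem.Str.split? text "." with
  | none =>
    rw [hsp] at hmap
    simp [PySem.Chars.split?] at hmap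
  | some parts =>
    rw [hsp] at hs hmap
    simp only [Option.map_some, PySem.Chars.split?] at hmap
    rw [if_neg (by decide)] at hmap
    apply pvMemSplitOnInfix text.toList (".".toList)
    rw [← Option.some_inj.mp hmap]
    simp only [Option.getD_some] at hs
    exact List.mem_map_of_mem hs

-- the two ports agree on every input
theorem pv_main (text : String) : extract_health_notes_py text = extract_health_notes_py_alt text := by
  unfold extract_health_notes_py extract_health_notes_py_alt
  set sents := (PySem.Str.split? text ".").getD [] with hsents
  set f := fun k : String => (sents.find? (fun s => PySem.Str.isIn k (PySem.Str.lower s))).map PySem.Str.strip with hf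
  have hA : pvHealthKeywords.foldl (fun notes keyword =>
      if PySem.Str.isIn keyword (PySem.Str.lower text) then pvScanA keyword notes sents else notes) [] =
      pvHealthKeywords.filterMap (fun k => if PySem.Str.isIn k (PySem.Str.lower text) then f k else none) := by
    have hstep : (fun (notes : List String) (keyword : String) =>
        if PySem.Str.isIn keyword (PySem.Str.lower text) then pvScanA keyword notes sents else notes) =
        (fun notes k => notes ++ ((if PySem.Str.isIn k (PySem.Str.lower text) then f k else none)).toList) := by
      funext notes k
      split
      · rw [pvScanA_eq, hf]
      · simp
    rw [hstep, pvFoldlToList]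
    simp
  have hB : ∀ k ∈ pvHealthKeywords,
      ((sents.foldl (fun d s =>
        pvHealthKeywords.foldl (fun d k' =>
          if !d.contains k' && PySem.Str.isIn k' (PySem.Str.lower s) then d.insert k' (PySem.Str.strip s) else d) d)
        PySem.Dict.empty).get? k) = f k := by
    intro k hk
    rw [pvOuterGet k hk sents PySem.Dict.empty]
    simp [PySem.Dict.get?_empty, hf]
  have hcong : ∀ k ∈ pvHealthKeywords,
      (if PySem.Str.isIn k (PySem.Str.lower text) then f k else none) = f k := by
    intro k hk
    split
    · rfl
    · rename_i h
      rw [hf]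
      cases hfind : sents.find? (fun s => PySem.Str.isIn k (PySem.Str.lower s)) with
      | none => simp only []; rw [hfind]; rfl
      | some s =>
        exfalso
        have hmem : s ∈ sents := List.mem_of_find?_eq_some hfind
        have hp := List.find?_some hfind
        exact h (pvIsInLowerMono k s text (pvSentenceInfix text s hmem) hp)
  simp only [hA]
  rw [List.filterMap_congr hcong, List.filterMap_congr (fun k hk => (hB k hk).symm)]

-- ===== VERDICT (by name: the statement is the Claim_ definition above) =====
theorem extract_health_notes_py_spec : Claim_equal_extract_health_notes_py := by
  intro text _
  unfold Spec_extract_health_notes_py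
  exact pv_main text
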